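-- pv_equiv track=rewrite | github.com/luzalbaposse/TD-1-IntroduccionALaProgramacion | Material/clases-practicas/P08/Soluciones/funciones-solucion.py | suma_en_posiciones_impares_v3
-- ===== SOURCE A (Python) =====
-- from typing import List
--
-- def suma_en_posiciones_impares_v3(l: List[int], n: int) -> List[int]:
--     '''Modifica l sumando n a los números que están en posiciones impares
--     Requiere: nada
--     Devuelve: Sea L el valor de l modificada, len(L)==len(l), y en toda posición
--           j entre 0 y len(l)-1:  L[j]==l[j] si j es par, o bien L[j]==l[j]+n si j es impar.
--     '''
--     vr: List[int] = []
--     i: int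
--     for i in range(len(l)):
--         if i % 2 == 1:
--             vr.append(l[i] + n)
--         else:
--             vr.append(l[i])
--     return vr
-- ===== SOURCE B (Python) =====
-- def suma_en_posiciones_impares_v3(l, n):
--     vr = list(l)
--     vr[1::2] = [x + n for x in l[1::2]]
--     return vr
-- ===== Notes on version B (the rewrite author's own statement) =====
-- stated objective: idiomatic
-- what changed: Replaces the index loop with a per-element parity test by a shallow copy plus one strided slice assignment that rewrites the odd-index sublist as a unit.
import Mathlib
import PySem

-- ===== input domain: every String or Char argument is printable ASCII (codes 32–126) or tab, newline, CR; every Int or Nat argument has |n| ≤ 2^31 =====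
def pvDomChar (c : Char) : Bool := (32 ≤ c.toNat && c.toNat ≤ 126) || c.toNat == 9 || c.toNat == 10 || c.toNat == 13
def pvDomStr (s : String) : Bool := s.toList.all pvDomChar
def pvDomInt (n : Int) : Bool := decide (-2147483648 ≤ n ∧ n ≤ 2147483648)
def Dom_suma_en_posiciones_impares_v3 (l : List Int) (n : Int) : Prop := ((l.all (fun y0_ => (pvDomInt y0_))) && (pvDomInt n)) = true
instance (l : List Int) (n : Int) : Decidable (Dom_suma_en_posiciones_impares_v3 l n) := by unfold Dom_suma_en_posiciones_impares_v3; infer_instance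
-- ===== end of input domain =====

-- B replaces A's index loop with per-element parity branch by a copy plus one strided
-- slice assignment over the odd-index sublist (idiomatic; return value only, neither mutates l).

-- ===== PORT A =====
-- for i in range(len(l)): if i % 2 == 1: vr.append(l[i]+n) else: vr.append(l[i])
def suma_en_posiciones_impares_v3 (l : List Int) (n : Int) : List Int :=
  (PySem.List.pyRange 0 l.length 1).foldl
    (fun vr i =>
      if i % 2 == 1 then vr ++ [PySem.List.pyGetD l i 0 + n]
      else vr ++ [PySem.List.pyGetD l i 0]) []

-- ===== PORT B =====
-- l[1::2] : every second element starting at index 1 (exact hand port of the stride-2 slice read)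
def pvOddSlice : List Int → List Int
  | [] => []
  | [_] => []
  | _ :: b :: rest => b :: pvOddSlice rest

-- vr[1::2] = vs : write vs back over the odd positions (exact hand port of the stride-2 slice write)
def pvOddWrite : List Int → List Int → List Int
  | [], _ => []
  | [a], _ => [a]
  | a :: b :: rest, [] => a :: b :: rest
  | a :: _ :: rest, v :: vs => a :: v :: pvOddWrite rest vs

def suma_en_posiciones_impares_v3_alt (l : List Int) (n : Int) : List Int :=
  pvOddWrite l ((pvOddSlice l).map (fun x => x + n))

-- ===== PRECONDITION & SPEC =====
def Spec_suma_en_posiciones_impares_v3 (l : List Int) (n : Int) (out : List Int) : Prop := out = suma_en_posiciones_impares_v3_alt l n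
instance (l : List Int) (n : Int) (out : List Int) : Decidable (Spec_suma_en_posiciones_impares_v3 l n out) := by unfold Spec_suma_en_posiciones_impares_v3; infer_instance

-- ===== CLAIM (what is proved, stated in full; the proofs are below) =====
def Claim_equal_suma_en_posiciones_impares_v3 : Prop := ∀ (l : List Int) (n : Int), Dom_suma_en_posiciones_impares_v3 l n → Spec_suma_en_posiciones_impares_v3 l n (suma_en_posiciones_impares_v3 l n)

-- ===== LEMMAS AND PROOFS =====

-- push the two-branch append into a single map
theorem foldl_append_if_else {α β : Type} (p : α → Bool) (f g : α → β) (l : List α) (acc : List β) :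
    l.foldl (fun acc x => if p x then acc ++ [f x] else acc ++ [g x]) acc
      = acc ++ l.map (fun x => if p x then f x else g x) := by
  induction l generalizing acc with
  | nil => simp
  | cons a t ih => by_cases h : p a <;> simp [h, ih]

-- A in closed map-over-range form
theorem portA_eq_map (l : List Int) (n : Int) :
    suma_en_posiciones_impares_v3 l n
      = (List.range l.length).map
          (fun k => if k % 2 == 1 then l.getD k 0 + n else l.getD k 0) := by
  unfold suma_en_posiciones_impares_v3
  rw [foldl_append_if_else, PySem.List.pyRange_zero_nat, List.map_map]
  simp only [List.nil_append]
  apply List.map_congr_left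
  intro k _
  have hmod : ((k : Int) % 2 == 1) = (k % 2 == 1) := by
    have : (k : Int) % 2 = ((k % 2 : Nat) : Int) := by
      rw [Int.natCast_mod]; norm_num
    rw [this]
    rcases Nat.mod_two_eq_zero_or_one k with h | h <;> simp [h]
  simp [Function.comp, hmod, PySem.List.pyGetD_natCast]

theorem altB_length (l : List Int) (n : Int) :
    (suma_en_posiciones_impares_v3_alt l n).length = l.length := by
  unfold suma_en_posiciones_impares_v3_alt
  induction l using pvOddSlice.induct with
  | case1 => rfl
  | case2 a => rfl
  | case3 a b rest ih => simpa [pvOddSlice, pvOddWrite] using ih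

theorem altB_getElem (l : List Int) (n : Int) (k : Nat) (hk : k < l.length)
    (hk' : k < (suma_en_posiciones_impares_v3_alt l n).length) :
    (suma_en_posiciones_impares_v3_alt l n)[k]
      = if k % 2 == 1 then l[k] + n else l[k] := by
  unfold suma_en_posiciones_impares_v3_alt at *
  induction l using pvOddSlice.induct generalizing k with
  | case1 => simp at hk
  | case2 a =>
    have hk0 : k = 0 := by simp at hk; omega
    subst hk0
    simp [pvOddSlice, pvOddWrite]
  | case3 a b rest ih =>
    simp only [pvOddSlice, List.map_cons, pvOddWrite] at hk' ⊢
    match k with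
    | 0 => simp
    | 1 => simp
    | (k + 2) =>
      have hk2 : k < rest.length := by simpa using hk
      have hk2' : k < (pvOddWrite rest ((pvOddSlice rest).map (fun x => x + n))).length := by
        simpa using hk'
      have hpar : ((k + 2) % 2 == 1) = (k % 2 == 1) := by
        have : (k + 2) % 2 = k % 2 := by omega
        rw [this]
      simpa [hpar] using ih k hk2 hk2'

-- ===== VERDICT (by name: the statement is the Claim_ definition above) =====
theorem suma_en_posiciones_impares_v3_spec : Claim_equal_suma_en_posiciones_impares_v3 := by
  intro l n _
  unfold Spec_suma_en_posiciones_impares_v3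
  apply List.ext_getElem
  · rw [altB_length, portA_eq_map]; simp
  · intro k hA hB
    have hk : k < l.length := by
      have := altB_length l n
      omega
    rw [altB_getElem l n k hk hB, List.getElem_of_eq (portA_eq_map l n) hA]
    simp only [List.getElem_map, List.getElem_range]
    rw [List.getD_eq_getElem]
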